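-- pv_equiv track=rewrite | github.com/jigglypop/- | 2021/03/0306/이차원배열과연산.py | make
-- ===== SOURCE A (Python) =====
-- from collections import Counter
--
-- def make(board):
--     Y = len(board)
--     X = len(board[0])
--     _board = []
--     Max = 0
--     for i in range(Y):
--         temp = []
--         for key, value in Counter(board[i]).items():
--             if key == 0:
--                 continue
--             temp.append([key, value])
--         temp = sorted(temp, key=lambda x: (x[1], x[0]))
--         temp = sum(temp, [])
--         _board.append(temp)
--         Max = max(Max, len(temp))
--     for b in _board:
--         L = Max - len(b)
--         b += [0] * L
--     return _board
-- ===== SOURCE B (Python) =====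
-- def make(board):
--     rows = []
--     for row in board:
--         # one sort of the raw nonzero elements, keyed by (occurrence count, value):
--         # equal values end up adjacent, and runs appear exactly in the final
--         # (count, value) order, so counts are emitted as run lengths in one pass.
--         s = sorted((x for x in row if x != 0), key=lambda x: (row.count(x), x))
--         out, run = [], None
--         for x in s:
--             if run and run[0] == x:
--                 run = (x, run[1] + 1)
--             else:
--                 if run:
--                     out += [run[0], run[1]]
--                 run = (x, 1)
--         if run:
--             out += [run[0], run[1]]
--         rows.append(out)
--     width = max(len(r) for r in rows)
--     return [r + [0] * (width - len(r)) for r in rows]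
-- ===== Notes on version B (the rewrite author's own statement) =====
-- stated objective: alternative
-- what changed: Instead of building a value->count table and then sorting (value,count) pairs, B performs a single sort of the raw nonzero elements keyed by (occurrence count, value) and streams the flattened [value,count] output directly as run lengths of that sorted sequence, padding at the end via a comprehension; it trades the hash-count-then-pair-sort pipeline for one element-level sort with no pair list ever built or sorted.
import Mathlib
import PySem

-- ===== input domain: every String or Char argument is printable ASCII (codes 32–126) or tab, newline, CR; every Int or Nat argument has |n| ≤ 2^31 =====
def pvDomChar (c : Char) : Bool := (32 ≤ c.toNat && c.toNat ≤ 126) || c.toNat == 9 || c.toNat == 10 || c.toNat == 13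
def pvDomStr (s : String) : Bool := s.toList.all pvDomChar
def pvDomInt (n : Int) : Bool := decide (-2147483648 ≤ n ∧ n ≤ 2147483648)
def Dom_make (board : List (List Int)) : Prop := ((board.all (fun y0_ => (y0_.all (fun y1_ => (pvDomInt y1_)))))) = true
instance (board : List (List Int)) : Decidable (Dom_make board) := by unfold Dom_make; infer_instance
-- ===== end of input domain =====

-- B drops A's value->count table and pair sort entirely: it sorts the raw nonzero elements
-- once by (occurrence count, value) and streams [value, run length] pairs in one pass,
-- padding via a comprehension; an alternative of similar cost, not claimed faster.

-- ===== PORT A =====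
-- one row of A's loop body: Counter items, skip key 0, sort by (count, key), flatten
def makeRowA (row : List Int) : List Int :=
  let temp := ((PySem.Dict.counter row).items).foldl
    (fun (acc : List (Int × Int)) kv => if kv.1 == 0 then acc else acc ++ [kv]) []
  let temp := PySem.List.sorted2 temp (fun x => x.2) (fun x => x.1)
  temp.foldl (fun (acc : List Int) p => acc ++ [p.1, p.2]) []   -- sum(temp, [])

def make (board : List (List Int)) : List (List Int) :=
  let Y : Int := PySem.List.len board
  -- (X := len(board[0]) is computed but unused; it raises IndexError iff board = [], excluded by Pre_)
  let st := (PySem.List.pyRange 0 Y).foldl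
    (fun (st : List (List Int) × Int) i =>
      let temp := makeRowA (PySem.List.pyGetD board i [])   -- board[i], i ∈ range(Y) so always in range
      (st.1 ++ [temp], max st.2 (PySem.List.len temp)))
    ([], 0)
  st.1.map (fun b => b ++ PySem.List.pyRepeat [0] (st.2 - PySem.List.len b))

-- ===== PORT B =====
-- loop body of B's single pass over the sorted row: extend/continue the current run
def stepB (st : List Int × Option (Int × Int)) (x : Int) : List Int × Option (Int × Int) :=
  match st.2 with
  | some r => if r.1 == x then (st.1, some (x, r.2 + 1)) else (st.1 ++ [r.1, r.2], some (x, 1))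
  | none => (st.1, some (x, 1))

-- flush the last open run ('if run: out += [run[0], run[1]]' after the loop)
def finishB (st : List Int × Option (Int × Int)) : List Int :=
  match st.2 with
  | some r => st.1 ++ [r.1, r.2]
  | none => st.1

def makeRowB (row : List Int) : List Int :=
  let s := PySem.List.sorted2 (row.filter (fun x => x != 0))
      (fun x => (PySem.List.count row x : Int)) (fun x => x)
  finishB (s.foldl stepB ([], none))

def make_alt (board : List (List Int)) : List (List Int) :=
  let rows := board.map makeRowB
  match PySem.List.max? (rows.map (fun r => PySem.List.len r)) (fun y => y) with
  | none => []   -- max() of an empty sequence raises ValueError in Python; excluded by Pre_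
  | some w => rows.map (fun r => r ++ PySem.List.pyRepeat [0] (w - PySem.List.len r))

-- ===== PRECONDITION & SPEC =====
-- A evaluates board[0] (and B takes max over the rows), so both raise on the empty board; Pre_ excludes it.
def Pre_make (board : List (List Int)) : Prop := board ≠ []
instance (board : List (List Int)) : Decidable (Pre_make board) := by unfold Pre_make; infer_instance
def pvWitness_make : List (List Int) := [[1, 2, 2], [0, 3]]
def Spec_make (board : List (List Int)) (out : List (List Int)) : Prop := out = make_alt board
instance (board : List (List Int)) (out : List (List Int)) : Decidable (Spec_make board out) := by unfold Spec_make; infer_instance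

-- ===== CLAIM (what is proved, stated in full; the proofs are below) =====
def Claim_equal_make : Prop := ∀ (board : List (List Int)), Dom_make board → Pre_make board → Spec_make board (make board)

-- ===== LEMMAS AND PROOFS =====

-- proof-only run-length encoding of adjacent equal elements (B's loop computes its flattening)
def rleB (l : List Int) : List (Int × Int) :=
  match l with
  | [] => []
  | x :: xs =>
      (x, 1 + ((xs.takeWhile (fun y => y == x)).length : Int)) ::
        rleB (xs.dropWhile (fun y => y == x))
termination_by l.length
decreasing_by
  simp only [List.length_cons]
  exact Nat.lt_succ_of_le (List.length_dropWhile_le _ _)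

def flat2 (ps : List (Int × Int)) : List Int := ps.flatMap (fun p => [p.1, p.2])

theorem sorted2_toLex {α : Type} (xs : List α) (f g : α → Int) :
    PySem.List.sorted2 xs f g = PySem.List.sorted xs (fun x => toLex (f x, g x)) := by
  have hb : (fun (a b : α) => decide (f a < f b) || (!decide (f b < f a) && decide (g a < g b)))
      = (fun (a b : α) => decide (toLex (f a, g a) < toLex (f b, g b))) := by
    funext a b
    have h : (toLex (f a, g a) < toLex (f b, g b)) ↔ (f a < f b ∨ f a = f b ∧ g a < g b) := by
      rw [Prod.Lex.lt_iff]; simp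
    simp only [h]
    by_cases h1 : f a < f b <;> by_cases h2 : f b < f a <;> by_cases h3 : g a < g b <;>
      simp [h1, h2, h3] <;> omega
  unfold PySem.List.sorted2 PySem.List.sorted
  simp only [if_neg (by decide : ¬ (false = true))]
  rw [hb]

-- B's streaming loop, started with an open run (v, c), emits that run (extended by the
-- leading v's of l) and then the RLE of the rest
theorem foldB_some (l : List Int) : ∀ (out : List Int) (v c : Int),
    finishB (l.foldl stepB (out, some (v, c))) =
      out ++ [v, c + ((l.takeWhile (fun y => y == v)).length : Int)]
        ++ flat2 (rleB (l.dropWhile (fun y => y == v))) := by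
  induction l with
  | nil => intro out v c; simp [finishB, flat2, rleB]
  | cons y ys ih =>
    intro out v c
    rw [List.foldl_cons]
    by_cases h : v = y
    · subst h
      have hstep : stepB (out, some (v, c)) v = (out, some (v, c + 1)) := by
        simp [stepB]
      rw [hstep, ih]
      simp only [List.takeWhile_cons, List.dropWhile_cons, beq_self_eq_true, if_true,
        List.length_cons]
      have : c + ((ys.takeWhile (fun y => y == v)).length + 1 : Nat)
          = c + 1 + ((ys.takeWhile (fun y => y == v)).length : Nat) := by push_cast; ring
      rw [this]
    · have hstep : stepB (out, some (v, c)) y = (out ++ [v, c], some (y, 1)) := by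
        simp [stepB, h]
      rw [hstep, ih]
      have hby : (y == v) = false := by simp [Ne.symm h]
      simp [hby, rleB, flat2]
  -- (cases ordered as in B's branch: run continues / run flushed)

theorem foldB_none (l : List Int) :
    finishB (l.foldl stepB ([], none)) = flat2 (rleB l) := by
  cases l with
  | nil => simp [finishB, rleB, flat2]
  | cons x xs =>
    rw [List.foldl_cons]
    have hstep : stepB ([], none) x = ([], some (x, 1)) := by simp [stepB]
    rw [hstep, foldB_some]
    simp [rleB, flat2]

theorem run_split_key {κ : Type} [LinearOrder κ] (key : Int → κ)
    (hinj : Function.Injective key) (x : Int) (xs : List Int)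
    (hmin : ∀ y ∈ xs, key x ≤ key y) (hp : xs.Pairwise (fun a b => key a ≤ key b)) :
    (xs.takeWhile (fun y => y == x)).length = xs.count x
      ∧ xs.dropWhile (fun y => y == x) = xs.filter (fun y => !(y == x)) := by
  induction xs with
  | nil => simp
  | cons y t ih =>
    rcases List.pairwise_cons.mp hp with ⟨hyt, hpt⟩
    by_cases hxy : y = x
    · subst hxy
      have ih' := ih (fun z hz => hmin z (List.mem_cons_of_mem _ hz)) hpt
      simp [ih'.1, ih'.2]
    · have hlt : key x < key y :=
        lt_of_le_of_ne (hmin y (List.mem_cons_self)) (fun h => hxy (hinj h).symm)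
      have hnx : ∀ z ∈ y :: t, ¬ (z = x) := by
        intro z hz
        rcases List.mem_cons.mp hz with rfl | hz'
        · exact hxy
        · intro h
          exact absurd (h ▸ hyt z hz') (not_le.mpr hlt)
      constructor
      · have : (y :: t).count x = 0 :=
          List.count_eq_zero.mpr (fun h => hnx x h rfl)
        rw [this]
        simp [hxy]
      · rw [List.dropWhile_cons]
        simp only [beq_iff_eq, hxy, if_false]
        rw [List.filter_eq_self.mpr]
        intro z hz; simp [hnx z hz]

theorem rleB_key (κ : Type) [LinearOrder κ] (key : Int → κ) (hinj : Function.Injective key)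
    (n : Nat) : ∀ l : List Int, l.length ≤ n → l.Pairwise (fun a b => key a ≤ key b) →
    ∃ ks : List Int, rleB l = ks.map (fun v => (v, (l.count v : Int)))
      ∧ ks.Nodup ∧ (∀ v, v ∈ ks ↔ v ∈ l) ∧ ks.Pairwise (fun a b => key a < key b) := by
  induction n with
  | zero =>
    intro l hl _
    have : l = [] := List.length_eq_zero_iff.mp (Nat.le_zero.mp hl)
    exact ⟨[], by simp [this, rleB]⟩
  | succ n ih =>
    intro l hl hp
    match l with
    | [] => exact ⟨[], by simp [rleB]⟩
    | x :: xs =>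
      rcases List.pairwise_cons.mp hp with ⟨hmin, hpt⟩
      obtain ⟨htake, hdrop⟩ := run_split_key key hinj x xs hmin hpt
      set xs' := xs.filter (fun y => !(y == x)) with hxs'
      have hlen : xs'.length ≤ n := by
        rw [hxs']
        have := List.length_filter_le (fun y => !(y == x)) xs
        simp only [List.length_cons] at hl; omega
      have hp' : xs'.Pairwise (fun a b => key a ≤ key b) := hpt.filter _
      obtain ⟨ks, hrle, hnd, hmem, hpw⟩ := ih xs' hlen hp'
      have hks_ne : ∀ v ∈ ks, v ≠ x := by
        intro v hv h
        have := List.of_mem_filter ((hmem v).mp hv)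
        simp [h] at this
      refine ⟨x :: ks, ?_, ?_, ?_, ?_⟩
      · rw [rleB, hdrop, hrle]
        simp only [List.map_cons, List.cons.injEq]
        constructor
        · simp [htake]
          ring
        · apply List.map_congr_left
          intro v hv
          have hvne' : v ≠ x := hks_ne v hv
          have hc : List.count v xs' = List.count v xs := by
            rw [hxs']; exact List.count_filter (by simp [hvne'])
          simp [hc, Ne.symm hvne']
      · exact List.nodup_cons.mpr ⟨fun hx => hks_ne x hx rfl, hnd⟩
      · intro v
        simp only [List.mem_cons, hmem v, hxs', List.mem_filter]
        constructor
        · rintro (rfl | ⟨hv, _⟩)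
          · exact Or.inl rfl
          · exact Or.inr hv
        · rintro (rfl | hv)
          · exact Or.inl rfl
          · by_cases hvx : v = x
            · exact Or.inl hvx
            · exact Or.inr ⟨hv, by simp [hvx]⟩
      · refine List.pairwise_cons.mpr ⟨?_, hpw⟩
        intro v hv
        have hvx : v ∈ xs := (List.mem_filter.mp ((hmem v).mp hv)).1
        exact lt_of_le_of_ne (hmin v hvx) (fun h => hks_ne v hv (hinj h).symm)

theorem rowA_eq_rowB (row : List Int) : makeRowA row = makeRowB row := by
  unfold makeRowA makeRowB
  simp only []
  set f : Int → Int × Int := fun k => (k, (row.count k : Int)) with hf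
  -- A's pre-sort pair list is a map of f over the distinct nonzero values of row
  have hA : ((PySem.Dict.counter row).items).foldl
      (fun (acc : List (Int × Int)) kv => if kv.1 == 0 then acc else acc ++ [kv]) []
      = ((PySem.Set.ofList row : List Int).filter (fun k => !(k == 0))).map f := by
    have hstep : (fun (acc : List (Int × Int)) kv => if kv.1 == 0 then acc else acc ++ [kv])
        = (fun acc kv => if (!(kv.1 == 0)) = true then acc ++ [kv] else acc) := by
      funext acc kv
      by_cases h : kv.1 == 0 <;> simp [h]
    rw [hstep, PySem.List.foldl_append_if_eq_filter, PySem.Dict.items_counter]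
    rw [List.filter_map]
    rfl
  -- B's sort of the raw elements is a sort by the lexicographic key (count, value)
  set S : List Int := row.filter (fun x => x != 0) with hS
  set k : Int → Lex (Int × Int) := fun x => toLex ((row.count x : Int), x) with hk
  have hkinj : Function.Injective k := by
    intro a b h
    rw [hk] at h
    simpa using congrArg (fun p : Lex (Int × Int) => (ofLex p).2) h
  have hs2 : PySem.List.sorted2 S (fun x => (PySem.List.count row x : Int)) (fun x => x)
      = PySem.List.sorted S k := by
    rw [sorted2_toLex]
    congr 1
  set l : List Int := PySem.List.sorted S k with hl
  have hp : l.Pairwise (fun a b => k a ≤ k b) := PySem.List.sorted_pairwise S k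
  obtain ⟨ks, hrle, hnd, hmem, hpw⟩ := rleB_key _ k hkinj l.length l (le_refl _) hp
  have hSl : ∀ v, v ∈ l ↔ v ∈ S := fun v => (PySem.List.sorted_perm S k false).mem_iff
  -- RLE run lengths of l are row counts: rleB l = ks.map f
  have hcount : ∀ v ∈ ks, (l.count v : Int) = (row.count v : Int) := by
    intro v hv
    have hvS : v ∈ S := (hSl v).mp ((hmem v).mp hv)
    have hvS' : v ∈ List.filter (fun x => x != 0) row := by rw [← hS]; exact hvS
    have hvne : (v != 0) = true := List.of_mem_filter (p := fun x => x != 0) hvS'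
    have hcl : l.count v = S.count v := (PySem.List.sorted_perm S k false).count_eq v
    have hcS : S.count v = row.count v := by rw [hS]; exact List.count_filter hvne
    rw [hcl, hcS]
  have hB : rleB l = ks.map f := by
    rw [hrle]
    exact List.map_congr_left (fun v hv => by rw [hf]; simp [hcount v hv])
  -- ks.map f is a strictly key-increasing rearrangement of A's pair list
  have hperm : (ks.map f).Perm
      (((PySem.Set.ofList row : List Int).filter (fun x => !(x == 0))).map f) := by
    apply List.Perm.map
    rw [List.perm_ext_iff_of_nodup hnd ((PySem.Set.nodup_ofList row).filter _)]
    intro v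
    rw [hmem, hSl, hS, List.mem_filter, List.mem_filter, PySem.Set.mem_ofList]
    simp [bne]
  have hpwf : (ks.map f).Pairwise
      (fun p q => (fun p : Int × Int => toLex (p.2, p.1)) p
        < (fun p : Int × Int => toLex (p.2, p.1)) q) := by
    rw [List.pairwise_map]
    exact hpw
  have hsortedA : PySem.List.sorted
      (((PySem.Set.ofList row : List Int).filter (fun x => !(x == 0))).map f)
      (fun p : Int × Int => toLex (p.2, p.1)) = ks.map f :=
    PySem.List.sorted_eq_of_perm_of_pairwise_lt _ _ _ hperm hpwf
  rw [hA, hs2, foldB_none, hB,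
    sorted2_toLex _ (fun x : Int × Int => x.2) (fun x : Int × Int => x.1), hsortedA,
    PySem.List.foldl_append_eq_flatMap (fun p : Int × Int => [p.1, p.2])]
  simp [flat2]

theorem foldA (rows : List (List Int)) : ∀ (acc : List (List Int)) (m : Int),
    rows.foldl (fun (st : List (List Int) × Int) row =>
        (st.1 ++ [makeRowA row], max st.2 (PySem.List.len (makeRowA row)))) (acc, m)
      = (acc ++ rows.map makeRowA,
         rows.foldl (fun m row => max m (PySem.List.len (makeRowA row))) m) := by
  induction rows with
  | nil => intro acc m; simp
  | cons r t ih => intro acc m; rw [List.foldl_cons, List.foldl_cons, ih]; simp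

theorem make_eq (board : List (List Int)) (h : board ≠ []) : make board = make_alt board := by
  obtain ⟨r0, rest, rfl⟩ := List.exists_cons_of_ne_nil h
  unfold make make_alt
  simp only []
  rw [PySem.List.foldl_pyRange_pyGetD (r0 :: rest) []
    (fun acc row => (acc.1 ++ [makeRowA row], max acc.2 (PySem.List.len (makeRowA row))))
    ([], 0) (le_refl 0)]
  rw [show (0 : Int).toNat = 0 from rfl, List.drop_zero, foldA, List.nil_append]
  have hrows : (r0 :: rest).map makeRowB = (r0 :: rest).map makeRowA :=
    List.map_congr_left (fun r _ => (rowA_eq_rowB r).symm)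
  rw [hrows]
  rw [List.map_cons, List.map_cons, List.map_cons, PySem.List.max?_id_cons]
  have h0 : max (0 : Int) (PySem.List.len (makeRowA r0)) = PySem.List.len (makeRowA r0) := by
    simp [PySem.List.len]
  simp only [List.foldl_map, List.foldl_cons, h0, List.map_cons]

-- ===== VERDICT (by name: the statement is the Claim_ definition above) =====
theorem make_spec : Claim_equal_make := by
  intro board _ hpre
  unfold Spec_make
  exact make_eq board hpre
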